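-- pv_equiv track=rewrite | github.com/thomasgwozdz/IW2018 | .gitignore/path_finder.py | convert_to_movements
-- ===== SOURCE A (Python) =====
-- def convert_to_movements(solved, capV, agents, t):
--     positions = {}
--     count = 0
--
--     for i in range(len(agents)):
--         for k in range(t):
--             for v in range(len(capV)):
--                 if solved[count] > 0:
--                     pos = []
--                     if i in positions:
--                         pos = positions[i]
--                     pos.append(v)
--                     positions[i] = pos
--                 count += 1
--
--     moves = []
--     for a in positions:
--         moves.append(positions[a])
--
--     return moves
-- ===== SOURCE B (Python) =====
-- def convert_to_movements(solved, capV, agents, t):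
--     nV = len(capV)
--     block = t * nV
--     # single flat pass: collect the indices of the positive entries, then group
--     # consecutive runs belonging to the same agent (idx // block), mapping idx -> v = idx % nV
--     hits = [idx for idx in range(len(agents) * block) if solved[idx] > 0]
--     moves = []
--     prev = None
--     for idx in hits:
--         a = idx // block
--         if a == prev:
--             moves[-1].append(idx % nV)
--         else:
--             moves.append([idx % nV])
--         prev = a
--     return moves
-- ===== Notes on version B (the rewrite author's own statement) =====
-- stated objective: alternative
-- what changed: Replaces A's triple nested loop with a running counter and a grouping dict by a single flat pass that collects the indices of positive entries, then a run-length grouping pass that recovers agent = idx//block and vertex = idx%len(capV) from the flat index; no dict and no nested loops are maintained.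
import Mathlib
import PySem

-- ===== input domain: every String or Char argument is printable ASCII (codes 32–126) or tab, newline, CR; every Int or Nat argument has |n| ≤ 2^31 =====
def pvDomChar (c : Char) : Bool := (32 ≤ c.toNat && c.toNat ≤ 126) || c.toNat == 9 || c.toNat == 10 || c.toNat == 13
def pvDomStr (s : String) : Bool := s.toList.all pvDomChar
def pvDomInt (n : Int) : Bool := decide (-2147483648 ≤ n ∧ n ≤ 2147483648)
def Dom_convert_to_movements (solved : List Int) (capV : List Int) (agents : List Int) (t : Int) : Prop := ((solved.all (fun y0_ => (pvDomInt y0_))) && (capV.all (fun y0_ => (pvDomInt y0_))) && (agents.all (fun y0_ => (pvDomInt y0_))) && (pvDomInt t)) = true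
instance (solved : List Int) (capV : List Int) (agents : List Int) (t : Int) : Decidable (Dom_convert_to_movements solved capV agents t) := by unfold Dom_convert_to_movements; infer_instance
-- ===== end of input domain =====

-- B replaces A's triple nested loop + grouping dict by one flat pass collecting the positive
-- indices and a run-grouping pass recovering agent = idx//block, vertex = idx%len(capV)
-- (same return value; no side effects involved).

-- ===== PORT A =====
-- literal port of A: triple loop over (i, k, v) carrying the state (positions dict, count);
-- 'pos = []; if i in positions: pos = positions[i]' is '(positions.get? i).getD []';
-- solved[count] is pyGetD (count stays in range on Pre_, which excludes the IndexError inputs)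
def convert_to_movements (solved : List Int) (capV : List Int) (agents : List Int) (t : Int) : List (List Int) :=
  let st :=
    (PySem.List.pyRange 0 (agents.length : Int) 1).foldl (fun st i =>
      (PySem.List.pyRange 0 t 1).foldl (fun st _k =>
        (PySem.List.pyRange 0 (capV.length : Int) 1).foldl (fun st v =>
          (if PySem.List.pyGetD solved st.2 0 > 0 then
              st.1.insert i ((st.1.get? i).getD [] ++ [v])
            else st.1, st.2 + 1)) st) st)
      ((PySem.Dict.empty : PySem.Dict Int (List Int)), (0 : Int))
  -- for a in positions: moves.append(positions[a])
  st.1.keys.foldl (fun moves a => moves ++ [(st.1.get? a).getD []]) []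

-- ===== PORT B =====
-- literal port of Source B: hits = the positive indices of the flat scan; then one pass grouping
-- consecutive hits of the same agent (a == prev), 'moves[-1].append' is dropLast ++ [last ++ [·]]
def convert_to_movements_alt (solved : List Int) (capV : List Int) (agents : List Int) (t : Int) : List (List Int) :=
  let nV : Int := (capV.length : Int)
  let block : Int := t * nV
  let hits := (PySem.List.pyRange 0 ((agents.length : Int) * block) 1).filter
      (fun idx => decide (PySem.List.pyGetD solved idx 0 > 0))
  (hits.foldl (fun st idx =>
      let a := PySem.Int.floordiv idx block
      if st.2 = some a then
        (st.1.dropLast ++ [st.1.getLast?.getD [] ++ [PySem.Int.mod idx nV]], some a)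
      else
        (st.1 ++ [[PySem.Int.mod idx nV]], some a))
    (([] : List (List Int)), (none : Option Int))).1

-- ===== PRECONDITION & SPEC =====
-- Pre_ excludes exactly the inputs on which A raises IndexError: the scan reads
-- solved[0 .. len(agents)*max(t,0)*len(capV) - 1], so solved must be at least that long.
def Pre_convert_to_movements (solved : List Int) (capV : List Int) (agents : List Int) (t : Int) : Prop :=
  (agents.length : Int) * (max t 0) * (capV.length : Int) ≤ (solved.length : Int)
instance (solved : List Int) (capV : List Int) (agents : List Int) (t : Int) : Decidable (Pre_convert_to_movements solved capV agents t) := by unfold Pre_convert_to_movements; infer_instance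

def pvWitness_convert_to_movements : List Int × List Int × List Int × Int := ([1, 0], [7], [5, 6], 1)

def Spec_convert_to_movements (solved : List Int) (capV : List Int) (agents : List Int) (t : Int) (out : List (List Int)) : Prop := out = convert_to_movements_alt solved capV agents t
instance (solved : List Int) (capV : List Int) (agents : List Int) (t : Int) (out : List (List Int)) : Decidable (Spec_convert_to_movements solved capV agents t out) := by unfold Spec_convert_to_movements; infer_instance

-- ===== CLAIM (what is proved, stated in full; the proofs are below) =====
def Claim_equal_convert_to_movements : Prop := ∀ (solved : List Int) (capV : List Int) (agents : List Int) (t : Int), Dom_convert_to_movements solved capV agents t → Pre_convert_to_movements solved capV agents t → Spec_convert_to_movements solved capV agents t (convert_to_movements solved capV agents t)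

-- ===== LEMMAS AND PROOFS =====

-- the v's the innermost loop collects in one pass starting at count c
def pvSeg (solved : List Int) (V : Nat) (c : Int) : List Int :=
  ((List.range V).map (fun j : Nat => (j : Int))).filter (fun v =>
    PySem.List.pyGetD solved (c + v) 0 > 0)

-- one agent's whole row, when the agent's scan starts at count c
def pvRow (solved : List Int) (T V : Nat) (c : Int) : List Int :=
  ((List.range T).map (fun j : Nat => (j : Int))).flatMap (fun k => pvSeg solved V (c + k * (V : Int)))

-- the association list A's dict holds after the first m agents
def pvItems (solved : List Int) (T V : Nat) (m : Nat) : List (Int × List Int) :=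
  ((List.range m).map (fun j : Nat => (j : Int))).filterMap (fun i =>
    if pvRow solved T V (i * ((T : Int) * (V : Int))) = [] then none
    else some (i, pvRow solved T V (i * ((T : Int) * (V : Int)))))

theorem pvSeg_succ (solved : List Int) (V : Nat) (c : Int) :
    pvSeg solved (V + 1) c
    = pvSeg solved V c ++ (if PySem.List.pyGetD solved (c + (V : Int)) 0 > 0 then [((V : Nat) : Int)] else []) := by
  unfold pvSeg
  rw [List.range_succ]
  by_cases hp : PySem.List.pyGetD solved (c + (V : Int)) 0 > 0 <;> simp [hp]

theorem pvRow_succ (solved : List Int) (T V : Nat) (c : Int) :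
    pvRow solved (T + 1) V c = pvRow solved T V c ++ pvSeg solved V (c + (T : Int) * (V : Int)) := by
  unfold pvRow
  rw [List.range_succ]
  simp

-- v-loop: appends the filtered v's to agent i's row and advances count by V
theorem pv_vloop (solved : List Int) (V : Nat) (i c : Int) (d : PySem.Dict Int (List Int))
    (r : List Int) (h : d.contains i = false) :
    ((List.range V).map (fun j : Nat => (j : Int))).foldl (fun st v =>
        (if PySem.List.pyGetD solved st.2 0 > 0 then
            st.1.insert i ((st.1.get? i).getD [] ++ [v])
          else st.1, st.2 + 1))
      ((if r = [] then d else d.insert i r), c)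
    = ((if r ++ pvSeg solved V c = [] then d else d.insert i (r ++ pvSeg solved V c)), c + (V : Int)) := by
  induction V with
  | zero => simp [pvSeg]
  | succ V ih =>
    rw [List.range_succ]
    simp only [List.map_append, List.foldl_append, List.map_cons, List.map_nil,
      List.foldl_cons, List.foldl_nil]
    rw [ih, pvSeg_succ]
    by_cases hp : PySem.List.pyGetD solved (c + (V : Int)) 0 > 0
    · by_cases hre : r ++ pvSeg solved V c = []
      · obtain ⟨hr1, hr2⟩ := List.append_eq_nil_iff.mp hre
        rw [if_pos hre]
        have hg : d.get? i = none := (PySem.Dict.get?_eq_none_iff_contains d i).mpr h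
        simp only [hp, if_true, hg, Option.getD_none, List.nil_append, hr1, hr2]
        simp only [Prod.mk.injEq]
        refine ⟨by simp, by push_cast; ring⟩
      · rw [if_neg hre]
        simp only [hp, if_true, PySem.Dict.get?_insert_self, Option.getD_some,
          PySem.Dict.insert_insert_self]
        have hne : ¬ r ++ (pvSeg solved V c ++ [((V : Nat) : Int)]) = [] := by simp
        rw [if_neg hne]
        simp only [Prod.mk.injEq]
        refine ⟨by simp, by push_cast; ring⟩
    · simp only [hp, if_false, List.append_nil]
      have hc : (c + (V : Int)) + 1 = c + (((V + 1 : Nat)) : Int) := by push_cast; ring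
      rw [hc]

-- k-loop: builds the agent's row and advances count by T*V
theorem pv_kloop (solved : List Int) (T V : Nat) (i c : Int) (d : PySem.Dict Int (List Int))
    (h : d.contains i = false) :
    ((List.range T).map (fun j : Nat => (j : Int))).foldl (fun st _k =>
        ((List.range V).map (fun j : Nat => (j : Int))).foldl (fun st v =>
          (if PySem.List.pyGetD solved st.2 0 > 0 then
              st.1.insert i ((st.1.get? i).getD [] ++ [v])
            else st.1, st.2 + 1)) st)
      (d, c)
    = ((if pvRow solved T V c = [] then d else d.insert i (pvRow solved T V c)),
       c + (T : Int) * (V : Int)) := by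
  induction T with
  | zero => simp [pvRow]
  | succ T ih =>
    rw [List.range_succ]
    simp only [List.map_append, List.foldl_append, List.map_cons, List.map_nil,
      List.foldl_cons, List.foldl_nil]
    rw [ih, pv_vloop solved V i (c + (T : Int) * (V : Int)) d (pvRow solved T V c) h,
      pvRow_succ]
    have hc : c + (T : Int) * (V : Int) + (V : Int)
        = c + (((T + 1 : Nat)) : Int) * (V : Int) := by push_cast; ring
    rw [hc]

-- the generic shape of pvItems: first components / second components
theorem pv_fmap_fst (g : Int → List Int) (l : List Int) :
    (l.filterMap (fun i => if g i = [] then none else some (i, g i))).map Prod.fst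
    = l.filter (fun i => ¬ g i = []) := by
  induction l with
  | nil => rfl
  | cons a l ih => by_cases hz : g a = [] <;> simp [hz, ih]

theorem pv_fmap_snd (g : Int → List Int) (l : List Int) :
    (l.filterMap (fun i => if g i = [] then none else some (i, g i))).map Prod.snd
    = (l.filter (fun i => ¬ g i = [])).map g := by
  induction l with
  | nil => rfl
  | cons a l ih => by_cases hz : g a = [] <;> simp [hz, ih]

theorem pv_fresh (solved : List Int) (T V m : Nat) :
    (PySem.Dict.mk (pvItems solved T V m)).contains ((m : Nat) : Int) = false := by
  rw [PySem.Dict.contains_eq_decide_mem_keys, decide_eq_false_iff_not]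
  intro hmem
  have h2 : ((m : Nat) : Int) ∈ (pvItems solved T V m).map Prod.fst := hmem
  unfold pvItems at h2
  rw [pv_fmap_fst] at h2
  have h3 := (List.mem_filter.mp h2).1
  rcases List.mem_map.mp h3 with ⟨j, hj, hje⟩
  have hjm := List.mem_range.mp hj
  simp only [Nat.cast_inj] at hje
  omega

theorem pvItems_succ (solved : List Int) (T V m : Nat) :
    pvItems solved T V (m + 1)
    = pvItems solved T V m
      ++ (if pvRow solved T V ((m : Int) * ((T : Int) * (V : Int))) = [] then []
          else [(((m : Nat) : Int), pvRow solved T V ((m : Int) * ((T : Int) * (V : Int))))]) := by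
  unfold pvItems
  rw [List.range_succ]
  by_cases hz : pvRow solved T V ((m : Int) * ((T : Int) * (V : Int))) = [] <;>
    simp [hz]

-- agent loop: after the first m agents the dict holds pvItems and count is m*T*V
theorem pv_iloop (solved : List Int) (capV : List Int) (t : Int) (m : Nat) :
    ((List.range m).map (fun j : Nat => (j : Int))).foldl (fun st i =>
        (PySem.List.pyRange 0 t 1).foldl (fun st _k =>
          (PySem.List.pyRange 0 (capV.length : Int) 1).foldl (fun st v =>
            (if PySem.List.pyGetD solved st.2 0 > 0 then
                st.1.insert i ((st.1.get? i).getD [] ++ [v])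
              else st.1, st.2 + 1)) st) st)
      ((PySem.Dict.empty : PySem.Dict Int (List Int)), (0 : Int))
    = (PySem.Dict.mk (pvItems solved t.toNat capV.length m),
       (m : Int) * ((t.toNat : Int) * (capV.length : Int))) := by
  induction m with
  | zero => simp [pvItems]; rfl
  | succ m ih =>
    rw [List.range_succ]
    simp only [List.map_append, List.foldl_append, List.map_cons, List.map_nil,
      List.foldl_cons, List.foldl_nil]
    rw [ih]
    simp only [PySem.List.pyRange_one, sub_zero, Int.toNat_natCast, zero_add]
    rw [pv_kloop solved t.toNat capV.length ((m : Nat) : Int)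
      ((m : Int) * ((t.toNat : Int) * (capV.length : Int)))
      (PySem.Dict.mk (pvItems solved t.toNat capV.length m))
      (pv_fresh solved t.toNat capV.length m)]
    rw [pvItems_succ]
    have hc : ((m : Nat) : Int) * ((t.toNat : Int) * (capV.length : Int))
        + (t.toNat : Int) * (capV.length : Int)
        = (((m + 1 : Nat)) : Int) * ((t.toNat : Int) * (capV.length : Int)) := by push_cast; ring
    rw [hc]
    by_cases hz : pvRow solved t.toNat capV.length ((m : Int) * ((t.toNat : Int) * (capV.length : Int))) = []
    · rw [if_pos hz, if_pos hz, List.append_nil]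
    · rw [if_neg hz, if_neg hz]
      simp only [Prod.mk.injEq, and_true]
      apply PySem.Dict.ext
      rw [PySem.Dict.items_insert_of_not_contains _ _ (pv_fresh solved t.toNat capV.length m)]

-- same statement with the agent loop written over pyRange, as it appears in the port
theorem pv_iloop' (solved : List Int) (capV : List Int) (t : Int) (n : Nat) :
    (PySem.List.pyRange 0 (n : Int) 1).foldl (fun st i =>
        (PySem.List.pyRange 0 t 1).foldl (fun st _k =>
          (PySem.List.pyRange 0 (capV.length : Int) 1).foldl (fun st v =>
            (if PySem.List.pyGetD solved st.2 0 > 0 then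
                st.1.insert i ((st.1.get? i).getD [] ++ [v])
              else st.1, st.2 + 1)) st) st)
      ((PySem.Dict.empty : PySem.Dict Int (List Int)), (0 : Int))
    = (PySem.Dict.mk (pvItems solved t.toNat capV.length n),
       (n : Int) * ((t.toNat : Int) * (capV.length : Int))) := by
  rw [PySem.List.pyRange_one 0 ((n : Nat) : Int)]
  simp only [sub_zero, Int.toNat_natCast, zero_add]
  exact pv_iloop solved capV t n

theorem pv_nodup_keys (solved : List Int) (T V m : Nat) :
    (PySem.Dict.mk (pvItems solved T V m)).keys.Nodup := by
  rw [show (PySem.Dict.mk (pvItems solved T V m)).keys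
      = (pvItems solved T V m).map Prod.fst from rfl]
  unfold pvItems
  rw [pv_fmap_fst]
  refine List.Nodup.filter _ (List.Nodup.map ?_ List.nodup_range)
  intro a b hab
  simpa using hab

-- A's port computes the second components of pvItems
theorem pvA_eq (solved : List Int) (capV : List Int) (agents : List Int) (t : Int) :
    convert_to_movements solved capV agents t
    = (pvItems solved t.toNat capV.length agents.length).map Prod.snd := by
  simp only [convert_to_movements]
  rw [pv_iloop']
  rw [PySem.List.foldl_append_singleton_eq_map]
  simp only [List.nil_append]
  simp only [← PySem.Dict.getD_eq_get?_getD]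
  rw [← PySem.Dict.values_eq_map_keys
      (PySem.Dict.mk (pvItems solved t.toNat capV.length agents.length))
      (pv_nodup_keys solved t.toNat capV.length agents.length) []]
  rfl

-- ---------- B side ----------

-- degenerate rows
theorem pvRow_degenerate (solved : List Int) (T V : Nat) (c : Int) (h : T = 0 ∨ V = 0) :
    pvRow solved T V c = [] := by
  rcases h with h | h <;> subst h <;> simp [pvRow, pvSeg]

-- splitting range (n*B) into n blocks of size B
theorem pv_range_mul (n B : Nat) :
    List.range (n * B) = (List.range n).flatMap (fun i => (List.range B).map (fun j => i * B + j)) := by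
  induction n with
  | zero => simp
  | succ n ih =>
    rw [Nat.succ_mul, List.range_add, ih, List.range_succ]
    simp

-- the hit segment of block i (as flat Int indices) and its row (as vertex numbers)
def pvSegN (solved : List Int) (B i : Nat) : List Int :=
  ((List.range B).map (fun j => ((i * B + j : Nat) : Int))).filter
    (fun idx => decide (PySem.List.pyGetD solved idx 0 > 0))

-- B's step function, abbreviated
def pvStep (nV block : Int) (st : List (List Int) × Option Int) (idx : Int) :
    List (List Int) × Option Int :=
  let a := PySem.Int.floordiv idx block
  if st.2 = some a then
    (st.1.dropLast ++ [st.1.getLast?.getD [] ++ [PySem.Int.mod idx nV]], some a)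
  else
    (st.1 ++ [[PySem.Int.mod idx nV]], some a)

-- a run of hits of the SAME agent a extends the last row
theorem pv_foldRun (nV block : Int) (seg : List Int) (a : Int)
    (h : ∀ x ∈ seg, PySem.Int.floordiv x block = a)
    (M : List (List Int)) (r : List Int) :
    seg.foldl (pvStep nV block) (M ++ [r], some a)
    = (M ++ [r ++ seg.map (fun x => PySem.Int.mod x nV)], some a) := by
  induction seg generalizing r with
  | nil => simp
  | cons x rest ih =>
    simp only [List.foldl_cons]
    rw [show pvStep nV block (M ++ [r], some a) x
        = (M ++ [r ++ [PySem.Int.mod x nV]], some a) by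
      simp [pvStep, h x (by simp)]]
    rw [ih (fun y hy => h y (by simp [hy])) (r ++ [PySem.Int.mod x nV])]
    simp

-- one block's hits, starting from a state whose prev is NOT this agent
theorem pv_foldSeg (nV block : Int) (seg : List Int) (a : Int)
    (h : ∀ x ∈ seg, PySem.Int.floordiv x block = a)
    (M : List (List Int)) (p : Option Int) (hp : p ≠ some a) :
    seg.foldl (pvStep nV block) (M, p)
    = (if seg = [] then (M, p)
       else (M ++ [seg.map (fun x => PySem.Int.mod x nV)], some a)) := by
  cases seg with
  | nil => simp
  | cons x rest =>
    simp only [List.foldl_cons]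
    rw [show pvStep nV block (M, p) x = (M ++ [[PySem.Int.mod x nV]], some a) by
      simp [pvStep, h x (by simp), hp]]
    rw [pv_foldRun nV block rest a (fun y hy => h y (by simp [hy])) M [PySem.Int.mod x nV]]
    simp

-- the prev value after processing the first n blocks
def pvPrev (solved : List Int) (B n : Nat) : Option Int :=
  (((List.range n).filter (fun i => ¬ pvSegN solved B i = [])).map (fun i : Nat => (i : Int))).getLast?

theorem pvPrev_lt (solved : List Int) (B n : Nat) (x : Int)
    (h : pvPrev solved B n = some x) : ∃ j : Nat, x = (j : Int) ∧ j < n := by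
  unfold pvPrev at h
  have hm := List.mem_of_getLast? h
  rcases List.mem_map.mp hm with ⟨j, hj, hje⟩
  exact ⟨j, hje.symm, List.mem_range.mp (List.mem_filter.mp hj).1⟩

-- all indices of block i locate agent i
theorem pv_div_block (B i : Nat) (hB : 0 < B) (x : Int)
    (hx : ∃ j : Nat, j < B ∧ x = ((i * B + j : Nat) : Int)) :
    PySem.Int.floordiv x ((B : Nat) : Int) = (i : Int) := by
  rcases hx with ⟨j, hj, rfl⟩
  rw [PySem.Int.floordiv_natCast]
  congr 1
  rw [Nat.add_comm, Nat.add_mul_div_right _ _ hB, Nat.div_eq_of_lt hj]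
  omega

-- whole outer fold: rows = the non-empty block rows, in block order
theorem pv_foldAll (solved : List Int) (B : Nat) (nV : Int) (hB : 0 < B) (n : Nat) :
    ((List.range n).flatMap (fun i => pvSegN solved B i)).foldl
      (pvStep nV ((B : Nat) : Int)) (([] : List (List Int)), (none : Option Int))
    = (((List.range n).filter (fun i => ¬ pvSegN solved B i = [])).map
         (fun i => (pvSegN solved B i).map (fun x => PySem.Int.mod x nV)),
       pvPrev solved B n) := by
  induction n with
  | zero => simp [pvPrev]
  | succ n ih =>
    rw [List.range_succ, List.flatMap_append, List.foldl_append, ih]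
    simp only [List.flatMap_cons, List.flatMap_nil, List.append_nil]
    have hdiv : ∀ x ∈ pvSegN solved B n, PySem.Int.floordiv x ((B : Nat) : Int) = (n : Int) := by
      intro x hx
      apply pv_div_block B n hB
      rcases List.mem_map.mp (List.mem_of_mem_filter hx) with ⟨j, hj, hje⟩
      exact ⟨j, List.mem_range.mp hj, hje.symm⟩
    have hp : pvPrev solved B n ≠ some ((n : Nat) : Int) := by
      intro h
      rcases pvPrev_lt solved B n _ h with ⟨j, hje, hjn⟩
      simp only [Nat.cast_inj] at hje
      omega
    rw [pv_foldSeg nV ((B : Nat) : Int) (pvSegN solved B n) ((n : Nat) : Int) hdiv _ _ hp]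
    by_cases hz : pvSegN solved B n = []
    · rw [if_pos hz]
      unfold pvPrev
      rw [List.range_succ, List.filter_append]
      simp [hz]
    · rw [if_neg hz]
      unfold pvPrev
      rw [List.range_succ, List.filter_append]
      simp [hz]

-- block i's hits, mapped through % nV, ARE A's row for agent i (main case t > 0)
theorem pv_rowN_eq (solved : List Int) (capV : List Int) (t : Int) (i : Nat) :
    (pvSegN solved (t.toNat * capV.length) i).map
        (fun x => PySem.Int.mod x (capV.length : Int))
    = pvRow solved t.toNat capV.length ((i : Int) * ((t.toNat : Int) * (capV.length : Int))) := by
  unfold pvSegN pvRow pvSeg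
  set T := t.toNat with hT
  set V := capV.length with hV
  rw [pv_range_mul T V, List.map_flatMap, List.filter_flatMap, List.map_flatMap,
    List.flatMap_map]
  apply List.flatMap_congr
  intro k _hk
  rw [List.map_map, List.filter_map, List.map_map, List.filter_map]
  -- the two filter predicates test the same cell of solved
  rw [List.filter_congr (q := fun v : Nat =>
      decide (PySem.List.pyGetD solved
        ((i : Int) * ((T : Int) * (V : Int)) + (k : Int) * (V : Int) + (v : Int)) 0 > 0))
    (by
      intro v _hv
      have harg : (((i * (T * V) + (k * V + v) : Nat)) : Int)
          = (i : Int) * ((T : Int) * (V : Int)) + (k : Int) * (V : Int) + (v : Int) := by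
        push_cast; ring
      simp [Function.comp, harg])]
  -- on the surviving v < V, mod recovers v itself
  apply List.map_congr_left
  intro v hv
  have hvV : v < V := List.mem_range.mp (List.mem_of_mem_filter hv)
  simp only [Function.comp_apply]
  rw [show (V : Int) = ((V : Nat) : Int) from rfl, PySem.Int.mod_natCast]
  congr 1
  rw [show i * (T * V) + (k * V + v) = v + (i * T + k) * V by ring,
    Nat.add_mul_mod_self_right, Nat.mod_eq_of_lt hvV]

-- the degenerate inputs: no time steps or no vertices — both sides are empty
theorem pvB_eq_degenerate (solved : List Int) (capV : List Int) (agents : List Int) (t : Int)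
    (h : t ≤ 0 ∨ capV.length = 0) :
    convert_to_movements_alt solved capV agents t
    = (pvItems solved t.toNat capV.length agents.length).map Prod.snd := by
  have hrow : ∀ c, pvRow solved t.toNat capV.length c = [] := by
    intro c
    apply pvRow_degenerate
    rcases h with h | h
    · exact Or.inl (Int.toNat_of_nonpos h)
    · exact Or.inr h
  have hitems : pvItems solved t.toNat capV.length agents.length = [] := by
    unfold pvItems
    simp [hrow]
  have htotal : (agents.length : Int) * (t * (capV.length : Int)) ≤ 0 := by
    rcases h with h | h
    · exact Int.mul_nonpos_of_nonneg_of_nonpos (by positivity)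
        (Int.mul_nonpos_of_nonpos_of_nonneg h (by positivity))
    · simp [h]
  simp only [convert_to_movements_alt, hitems, List.map_nil]
  rw [PySem.List.pyRange_one_eq_nil htotal]
  simp

theorem pvB_eq (solved : List Int) (capV : List Int) (agents : List Int) (t : Int) :
    convert_to_movements_alt solved capV agents t
    = (pvItems solved t.toNat capV.length agents.length).map Prod.snd := by
  by_cases hdeg : t ≤ 0 ∨ capV.length = 0
  · exact pvB_eq_degenerate solved capV agents t hdeg
  rw [not_or] at hdeg
  obtain ⟨ht', hV'⟩ := hdeg
  have ht : 0 < t := lt_of_not_ge ht'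
  have hV : 0 < capV.length := Nat.pos_of_ne_zero hV'
  set T := t.toNat with hT
  set V := capV.length with hVdef
  set n := agents.length with hn
  set B := T * V with hB
  have hBpos : 0 < B := Nat.mul_pos (by omega) hV
  have htT : t = (T : Int) := (Int.toNat_of_nonneg ht.le).symm
  -- the flat-scan bound is (n*B : Nat) and the divisor block is (B : Nat)
  have hblock : t * (V : Int) = ((B : Nat) : Int) := by rw [htT, hB]; push_cast; ring
  have htotal : (n : Int) * (t * (V : Int)) = (((n * B : Nat)) : Int) := by
    rw [hblock]; push_cast; ring
  simp only [convert_to_movements_alt]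
  rw [htotal, hblock, PySem.List.pyRange_zero_natCast]
  rw [pv_range_mul n B, List.map_flatMap, List.filter_flatMap]
  have hsegs : (fun i => (((List.range B).map (fun j => i * B + j)).map
        (fun k : Nat => (k : Int))).filter
      (fun idx => decide (PySem.List.pyGetD solved idx 0 > 0)))
      = fun i => pvSegN solved B i := by
    funext i
    unfold pvSegN
    rw [List.map_map]
    rfl
  rw [hsegs]
  rw [show (fun (st : List (List Int) × Option Int) (idx : Int) =>
        let a := PySem.Int.floordiv idx ((B : Nat) : Int);
        if st.2 = some a then
          (st.1.dropLast ++ [st.1.getLast?.getD [] ++ [PySem.Int.mod idx (V : Int)]], some a)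
        else
          (st.1 ++ [[PySem.Int.mod idx (V : Int)]], some a))
      = pvStep (V : Int) ((B : Nat) : Int) from rfl]
  rw [pv_foldAll solved B (V : Int) hBpos n]
  -- right-hand side: pvItems' second components as rows over range n
  unfold pvItems
  rw [pv_fmap_snd, List.filter_map, List.map_map]
  -- identify rows and non-emptiness tests block by block
  have hrows : ∀ i : Nat, (pvSegN solved B i).map (fun x => PySem.Int.mod x (V : Int))
      = pvRow solved T V ((i : Int) * ((T : Int) * (V : Int))) := by
    intro i
    exact pv_rowN_eq solved capV t i
  rw [List.filter_congr (q := fun i : Nat =>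
      decide (¬ pvRow solved T V ((i : Int) * ((T : Int) * (V : Int))) = []))
    (by
      intro i _hi
      simp only [← hrows i, List.map_eq_nil_iff])]
  apply List.map_congr_left
  intro i _hi
  simp only [Function.comp_apply]
  exact hrows i

-- ===== VERDICT (by name: the statement is the Claim_ definition above) =====
theorem convert_to_movements_spec : Claim_equal_convert_to_movements := by
  intro solved capV agents t _ _
  unfold Spec_convert_to_movements
  rw [pvA_eq, pvB_eq]
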